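-- pv_equiv track=rewrite | github.com/najeong12/Baekjoon_Algorithm | 16935.py | fun6
-- ===== SOURCE A (Python) =====
-- def fun6(N, M, arr):
--     tmp = [[0 for _ in range(M)] for _ in range(N)]
--     n = int(N/2)
--     m = int(M/2)
--     for i in range(N):
--         for j in range(M):
--             if (0 <= i < n and 0 <= j < m):
--                 tmp[i][j] = arr[i][j+m]
--             elif (0 <= i < n and j >= m):
--                 tmp[i][j] = arr[i+n][j]
--             elif (i >= n and j >= m):
--                 tmp[i][j] = arr[i][j-m]
--             elif (i >= n and 0 <= j < m):
--                 tmp[i][j] = arr[i-n][j]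
--     return tmp
-- ===== SOURCE B (Python) =====
-- def fun6(N, M, arr):
--     n = int(N / 2)
--     m = int(M / 2)
--     top = [arr[i][m:2*m] + arr[i+n][m:M] for i in range(n)]
--     bottom = [arr[i-n][0:m] + arr[i][0:M-m] for i in range(n, N)]
--     return top + bottom
-- ===== Notes on version B (the rewrite author's own statement) =====
-- stated objective: simpler
-- what changed: Replaces the per-cell double loop with a four-way branch by whole-row assembly: each output row is built from two list slices of the input rows and concatenated, splitting the grid at n=N//2 rows and m=M//2 columns.
-- outside the precondition, e.g. on fun6(2, -2, [[1, 2], [3, 4]]): A returns [[], []], B returns [[], [1, 3]]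
import Mathlib
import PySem

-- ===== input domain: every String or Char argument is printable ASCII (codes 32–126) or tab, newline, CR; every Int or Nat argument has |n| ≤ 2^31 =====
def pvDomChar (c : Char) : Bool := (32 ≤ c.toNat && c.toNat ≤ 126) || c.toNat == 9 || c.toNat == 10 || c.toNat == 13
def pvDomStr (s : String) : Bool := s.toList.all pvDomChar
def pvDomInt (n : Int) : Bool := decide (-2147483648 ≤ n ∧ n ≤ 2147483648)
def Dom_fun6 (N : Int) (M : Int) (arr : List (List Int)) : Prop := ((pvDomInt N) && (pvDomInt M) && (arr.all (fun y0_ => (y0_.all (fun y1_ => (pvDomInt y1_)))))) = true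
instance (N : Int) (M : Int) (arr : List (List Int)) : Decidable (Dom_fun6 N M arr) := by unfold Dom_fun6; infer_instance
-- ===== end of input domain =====

-- B replaces A's per-cell four-way branch with whole-row assembly from list slices (simpler decomposition).

-- ===== PORT A =====
def fun6 (N : Int) (M : Int) (arr : List (List Int)) : List (List Int) :=
  let tmp : List (List Int) :=
    (PySem.List.pyRange 0 N 1).map (fun _ => (PySem.List.pyRange 0 M 1).map (fun _ => (0 : Int)))
  let n : Int := PySem.Int.truncdiv N 2
  let m : Int := PySem.Int.truncdiv M 2
  (PySem.List.pyRange 0 N 1).foldl (fun tmp i =>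
    (PySem.List.pyRange 0 M 1).foldl (fun tmp j =>
      if 0 ≤ i ∧ i < n ∧ 0 ≤ j ∧ j < m then
        PySem.List.pySetD tmp i (PySem.List.pySetD (PySem.List.pyGetD tmp i []) j
          (PySem.List.pyGetD (PySem.List.pyGetD arr i []) (j + m) 0))
      else if 0 ≤ i ∧ i < n ∧ m ≤ j then
        PySem.List.pySetD tmp i (PySem.List.pySetD (PySem.List.pyGetD tmp i []) j
          (PySem.List.pyGetD (PySem.List.pyGetD arr (i + n) []) j 0))
      else if n ≤ i ∧ m ≤ j then
        PySem.List.pySetD tmp i (PySem.List.pySetD (PySem.List.pyGetD tmp i []) j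
          (PySem.List.pyGetD (PySem.List.pyGetD arr i []) (j - m) 0))
      else if n ≤ i ∧ 0 ≤ j ∧ j < m then
        PySem.List.pySetD tmp i (PySem.List.pySetD (PySem.List.pyGetD tmp i []) j
          (PySem.List.pyGetD (PySem.List.pyGetD arr (i - n) []) j 0))
      else tmp) tmp) tmp

-- ===== PORT B =====
def fun6_alt (N : Int) (M : Int) (arr : List (List Int)) : List (List Int) :=
  let n : Int := PySem.Int.truncdiv N 2
  let m : Int := PySem.Int.truncdiv M 2
  let top : List (List Int) := (PySem.List.pyRange 0 n 1).map (fun i =>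
    PySem.List.slice (PySem.List.pyGetD arr i []) (some m) (some (2 * m)) ++
    PySem.List.slice (PySem.List.pyGetD arr (i + n) []) (some m) (some M))
  let bottom : List (List Int) := (PySem.List.pyRange n N 1).map (fun i =>
    PySem.List.slice (PySem.List.pyGetD arr (i - n) []) (some 0) (some m) ++
    PySem.List.slice (PySem.List.pyGetD arr i []) (some 0) (some (M - m)))
  top ++ bottom

-- ===== PRECONDITION & SPEC =====
-- Pre_ excludes inputs where A raises IndexError (fewer than N rows, or a row among the first N
-- shorter than M) and a negative column count M with a positive row count N, which is outside the
-- natural grid domain (A then returns N empty rows while B's negative slice bounds select real elements).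
def Pre_fun6 (N : Int) (M : Int) (arr : List (List Int)) : Prop :=
  (0 ≤ M ∨ N ≤ 0) ∧ N ≤ (arr.length : Int) ∧ ∀ row ∈ arr.take N.toNat, M ≤ (row.length : Int)
instance (N : Int) (M : Int) (arr : List (List Int)) : Decidable (Pre_fun6 N M arr) := by
  unfold Pre_fun6; infer_instance

def pvWitness_fun6 : Int × Int × List (List Int) := (2, 2, [[1, 2], [3, 4]])

def Spec_fun6 (N : Int) (M : Int) (arr : List (List Int)) (out : List (List Int)) : Prop := out = fun6_alt N M arr
instance (N : Int) (M : Int) (arr : List (List Int)) (out : List (List Int)) : Decidable (Spec_fun6 N M arr out) := by unfold Spec_fun6; infer_instance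

-- ===== CLAIM (what is proved, stated in full; the proofs are below) =====
def Claim_equal_fun6 : Prop := ∀ (N : Int) (M : Int) (arr : List (List Int)), Dom_fun6 N M arr → Pre_fun6 N M arr → Spec_fun6 N M arr (fun6 N M arr)

-- ===== LEMMAS AND PROOFS =====

theorem tdiv2_nonneg (N : Int) (h : 0 ≤ N) : PySem.Int.truncdiv N 2 = N / 2 := by
  simp only [PySem.Int.truncdiv]
  have h2 : Int.tdiv N 2 = N / 2 + if 0 ≤ N ∨ 2 ∣ N then 0 else Int.sign 2 := Int.tdiv_eq_ediv
  split_ifs at h2 <;> simp [Int.sign] at h2 <;> omega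

theorem tdiv2_between (N : Int) (h : N ≤ 0) : N ≤ PySem.Int.truncdiv N 2 ∧ PySem.Int.truncdiv N 2 ≤ 0 := by
  simp only [PySem.Int.truncdiv]
  have h2 : Int.tdiv N 2 = N / 2 + if 0 ≤ N ∨ 2 ∣ N then 0 else Int.sign 2 := Int.tdiv_eq_ediv
  split_ifs at h2 <;> simp [Int.sign] at h2 <;> omega

-- the per-cell value A stores at (i, j) (the four-way branch of A, else the initial 0)
def quadVal (n m : Int) (arr : List (List Int)) (i j : Int) : Int :=
  if 0 ≤ i ∧ i < n ∧ 0 ≤ j ∧ j < m then PySem.List.pyGetD (PySem.List.pyGetD arr i []) (j + m) 0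
  else if 0 ≤ i ∧ i < n ∧ m ≤ j then PySem.List.pyGetD (PySem.List.pyGetD arr (i + n) []) j 0
  else if n ≤ i ∧ m ≤ j then PySem.List.pyGetD (PySem.List.pyGetD arr i []) (j - m) 0
  else if n ≤ i ∧ 0 ≤ j ∧ j < m then PySem.List.pyGetD (PySem.List.pyGetD arr (i - n) []) j 0
  else 0

-- A's inner-loop body as a named function (definitionally the lambda inside fun6)
def stepA (n m : Int) (arr : List (List Int)) (i : Int) (tmp : List (List Int)) (j : Int) : List (List Int) :=
  if 0 ≤ i ∧ i < n ∧ 0 ≤ j ∧ j < m then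
    PySem.List.pySetD tmp i (PySem.List.pySetD (PySem.List.pyGetD tmp i []) j
      (PySem.List.pyGetD (PySem.List.pyGetD arr i []) (j + m) 0))
  else if 0 ≤ i ∧ i < n ∧ m ≤ j then
    PySem.List.pySetD tmp i (PySem.List.pySetD (PySem.List.pyGetD tmp i []) j
      (PySem.List.pyGetD (PySem.List.pyGetD arr (i + n) []) j 0))
  else if n ≤ i ∧ m ≤ j then
    PySem.List.pySetD tmp i (PySem.List.pySetD (PySem.List.pyGetD tmp i []) j
      (PySem.List.pyGetD (PySem.List.pyGetD arr i []) (j - m) 0))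
  else if n ≤ i ∧ 0 ≤ j ∧ j < m then
    PySem.List.pySetD tmp i (PySem.List.pySetD (PySem.List.pyGetD tmp i []) j
      (PySem.List.pyGetD (PySem.List.pyGetD arr (i - n) []) j 0))
  else tmp

theorem stepA_set (n m : Int) (arr : List (List Int)) (i j : Int) (tmp : List (List Int))
    (hi : 0 ≤ i) (hj : 0 ≤ j) :
    stepA n m arr i tmp j =
      PySem.List.pySetD tmp i (PySem.List.pySetD (PySem.List.pyGetD tmp i []) j (quadVal n m arr i j)) := by
  unfold stepA quadVal
  split_ifs <;> first | rfl | omega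

theorem inner_aux (n m : Int) (arr : List (List Int)) (i : Int) (hi : 0 ≤ i)
    (tmp : List (List Int)) (hlen : i.toNat < tmp.length)
    (k : Nat) (hk : k ≤ (PySem.List.pyGetD tmp i []).length) :
    (PySem.List.pyRange 0 (k : Int) 1).foldl (stepA n m arr i) tmp =
      PySem.List.pySetD tmp i
        (((List.range k).map (fun (j : Nat) => quadVal n m arr i (j : Int))) ++
          (PySem.List.pyGetD tmp i []).drop k) := by
  have hiL : i < (tmp.length : Int) := by omega
  induction k with
  | zero =>
    simp only [Nat.cast_zero, PySem.List.pyRange_one_eq_nil (le_refl (0 : Int)),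
      List.foldl_nil, List.range_zero, List.map_nil, List.nil_append, List.drop_zero]
    rw [PySem.List.pyGetD_eq_getElem tmp [] hi hiL, PySem.List.pySetD_of_nonneg tmp _ hi]
    exact (List.set_getElem_self hlen).symm
  | succ k ih =>
    have hk' : k ≤ (PySem.List.pyGetD tmp i []).length := Nat.le_of_succ_le hk
    have hcast : ((k + 1 : Nat) : Int) = (k : Int) + 1 := by push_cast; ring
    rw [hcast, PySem.List.pyRange_one_succ_right (by positivity), List.foldl_append,
      ih hk', List.foldl_cons, List.foldl_nil,
      stepA_set n m arr i (k : Int) _ hi (by positivity)]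
    rw [PySem.List.pyGetD_eq_getElem tmp [] hi hiL] at hk ⊢
    set P := (List.range k).map (fun (j : Nat) => quadVal n m arr i (j : Int)) with hP
    have hPlen : P.length = k := by simp [hP]
    rw [PySem.List.pySetD_of_nonneg tmp _ hi]
    have hset : i.toNat < (tmp.set i.toNat (P ++ tmp[i.toNat].drop k)).length := by simpa using hlen
    rw [PySem.List.pyGetD_eq_getElem _ [] hi (by simpa using hiL), List.getElem_set_self,
      PySem.List.pySetD_of_nonneg _ _ (by positivity : (0:Int) ≤ (k:Int)), Int.toNat_natCast]
    have hsplit : ∀ (l2 : List Int) (v : Int), (P ++ l2).set k v = P ++ l2.set 0 v := by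
      intro l2 v
      conv_lhs => rw [show k = P.length from hPlen.symm]
      rw [List.set_append_right _ _ (le_refl _)]; simp
    rw [hsplit, List.drop_eq_getElem_cons hk, List.set_cons_zero,
      PySem.List.pySetD_of_nonneg _ _ hi, PySem.List.pySetD_of_nonneg tmp _ hi, List.set_set,
      List.range_succ, List.map_append, hP]
    simp

theorem outer_aux (n m M : Int) (arr : List (List Int)) (hM : 0 ≤ M)
    (Z : List (List Int)) (hZ : ∀ r ∈ Z, r.length = M.toNat) (k : Nat) (hk : k ≤ Z.length) :
    (PySem.List.pyRange 0 (k : Int) 1).foldl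
        (fun tmp i => (PySem.List.pyRange 0 M 1).foldl (stepA n m arr i) tmp) Z =
      ((List.range k).map (fun (i : Nat) =>
        (List.range M.toNat).map (fun (j : Nat) => quadVal n m arr (i : Int) (j : Int)))) ++ Z.drop k := by
  induction k with
  | zero =>
    simp [PySem.List.pyRange_one_eq_nil (le_refl (0 : Int))]
  | succ k ih =>
    have hk' : k ≤ Z.length := Nat.le_of_succ_le hk
    have klt : k < Z.length := hk
    have hcast : ((k + 1 : Nat) : Int) = (k : Int) + 1 := by push_cast; ring
    rw [hcast, PySem.List.pyRange_one_succ_right (by positivity), List.foldl_append,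
      ih hk', List.foldl_cons, List.foldl_nil]
    set P := (List.range k).map (fun (i : Nat) =>
      (List.range M.toNat).map (fun (j : Nat) => quadVal n m arr (i : Int) (j : Int))) with hP
    have hPlen : P.length = k := by simp [hP]
    have htmplen : k < (P ++ Z.drop k).length := by
      simp [hPlen]; omega
    have hrowget : PySem.List.pyGetD (P ++ Z.drop k) (k : Int) [] = Z[k] := by
      rw [PySem.List.pyGetD_eq_getElem _ [] (by positivity) (by exact_mod_cast htmplen)]
      simp only [Int.toNat_natCast]
      rw [List.getElem_append_right hPlen.le]
      simp [hPlen]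
    have hZk : Z[k].length = M.toNat := hZ _ (List.getElem_mem klt)
    rw [show M = ((M.toNat : Nat) : Int) from (Int.toNat_of_nonneg hM).symm]
    rw [inner_aux n m arr (k : Int) (by positivity) _ (by simpa using htmplen) M.toNat
      (by rw [hrowget, hZk])]
    have hdrop : Z[k].drop M.toNat = [] := by rw [← hZk]; exact List.drop_length
    rw [hrowget, hdrop, List.append_nil,
      PySem.List.pySetD_of_nonneg _ _ (by positivity : (0:Int) ≤ (k:Int)), Int.toNat_natCast]
    have hsplit : ∀ (l2 : List (List Int)) (v : List Int), (P ++ l2).set k v = P ++ l2.set 0 v := by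
      intro l2 v
      conv_lhs => rw [show k = P.length from hPlen.symm]
      rw [List.set_append_right _ _ (le_refl _)]; simp
    rw [hsplit, List.drop_eq_getElem_cons klt, List.set_cons_zero, List.range_succ,
      List.map_append, hP]
    simp [Int.toNat_of_nonneg hM]

-- final shape of A's computation
theorem funA_eq (N M : Int) (arr : List (List Int)) (hN : 0 < N) (hM : 0 ≤ M) :
    fun6 N M arr =
      (List.range N.toNat).map (fun (i : Nat) =>
        (List.range M.toNat).map (fun (j : Nat) =>
          quadVal (PySem.Int.truncdiv N 2) (PySem.Int.truncdiv M 2) arr (i : Int) (j : Int))) := by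
  simp only [fun6]
  show (PySem.List.pyRange 0 N 1).foldl
      (fun tmp i => (PySem.List.pyRange 0 M 1).foldl
        (stepA (PySem.Int.truncdiv N 2) (PySem.Int.truncdiv M 2) arr i) tmp)
      ((PySem.List.pyRange 0 N 1).map (fun _ => (PySem.List.pyRange 0 M 1).map (fun _ => (0 : Int)))) = _
  set Z := (PySem.List.pyRange 0 N 1).map (fun _ => (PySem.List.pyRange 0 M 1).map (fun _ => (0 : Int))) with hZdef
  have hZlen : Z.length = N.toNat := by simp [hZdef, PySem.List.length_pyRange_one]
  have hZ : ∀ r ∈ Z, r.length = M.toNat := by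
    intro r hr
    rcases List.mem_map.mp hr with ⟨_, _, rfl⟩
    simp [PySem.List.length_pyRange_one]
  rw [show PySem.List.pyRange 0 N 1 = PySem.List.pyRange 0 ((N.toNat : Nat) : Int) 1 from
    by rw [Int.toNat_of_nonneg hN.le]]
  have hdropZ : Z.drop N.toNat = [] := by rw [← hZlen]; exact List.drop_length
  rw [outer_aux _ _ M arr hM Z hZ N.toNat (le_of_eq hZlen.symm), hdropZ, List.append_nil]

theorem sliceMap (xs : List Int) (a b : Int) (ha : 0 ≤ a) (hab : a ≤ b) (hb : b ≤ (xs.length : Int)) :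
    PySem.List.slice xs (some a) (some b) =
      (List.range (b - a).toNat).map (fun (k : Nat) => PySem.List.pyGetD xs (a + (k : Int)) 0) := by
  rw [PySem.List.slice_toNat xs ha (le_trans ha hab)]
  apply List.ext_getElem
  · simp; omega
  · intro idx h1 h2
    simp only [List.getElem_take, List.getElem_drop, List.getElem_map, List.getElem_range]
    rw [PySem.List.pyGetD_eq_getElem xs 0 (by positivity)
      (by simp only [List.length_take, List.length_drop] at h1; omega)]
    congr 1
    omega

theorem range_split (m M : Int) (hm : 0 ≤ m) (hmM : m ≤ M) (f : Int → Int) :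
    (List.range M.toNat).map (fun (j : Nat) => f (j : Int)) =
      (List.range m.toNat).map (fun (j : Nat) => f (j : Int)) ++
      (List.range (M - m).toNat).map (fun (k : Nat) => f (m + (k : Int))) := by
  rw [show M.toNat = m.toNat + (M - m).toNat by omega, List.range_add, List.map_append,
    List.map_map]
  congr 1
  apply List.map_congr_left
  intro k _
  simp only [Function.comp_apply]
  congr 1
  push_cast [Int.toNat_of_nonneg hm]
  ring

theorem funB_eq (N M : Int) (arr : List (List Int)) (hN : 0 < N) (hM : 0 ≤ M)
    (hlen : N ≤ (arr.length : Int))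
    (hrow : ∀ row ∈ arr.take N.toNat, M ≤ (row.length : Int)) :
    fun6_alt N M arr =
      (List.range N.toNat).map (fun (i : Nat) =>
        (List.range M.toNat).map (fun (j : Nat) =>
          quadVal (PySem.Int.truncdiv N 2) (PySem.Int.truncdiv M 2) arr (i : Int) (j : Int))) := by
  simp only [fun6_alt]
  generalize hgn : PySem.Int.truncdiv N 2 = n
  generalize hgm : PySem.Int.truncdiv M 2 = m
  have hn : n = N / 2 := by rw [← hgn]; exact tdiv2_nonneg N hN.le
  have hm : m = M / 2 := by rw [← hgm]; exact tdiv2_nonneg M hM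
  have hn0 : 0 ≤ n := by omega
  have hnN : n ≤ N := by omega
  have h2n : 2 * n ≤ N := by omega
  have hm0 : 0 ≤ m := by omega
  have hmM : m ≤ M := by omega
  have h2m : 2 * m ≤ M := by omega
  have hrowlen : ∀ t : Int, 0 ≤ t → t < N → M ≤ ((PySem.List.pyGetD arr t []).length : Int) := by
    intro t ht htN
    rw [PySem.List.pyGetD_eq_getElem arr [] ht (by omega)]
    apply hrow
    have htake : t.toNat < (arr.take N.toNat).length := by simp; omega
    have hget : (arr.take N.toNat)[t.toNat] = arr[t.toNat] := List.getElem_take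
    exact hget ▸ List.getElem_mem htake
  -- rewrite the RHS as a map over pyRange 0 N 1 and split it at n
  rw [show (List.range N.toNat).map (fun (i : Nat) =>
        (List.range M.toNat).map (fun (j : Nat) => quadVal n m arr (i : Int) (j : Int))) =
      (PySem.List.pyRange 0 N 1).map (fun (i : Int) =>
        (List.range M.toNat).map (fun (j : Nat) => quadVal n m arr i (j : Int))) by
    rw [PySem.List.pyRange_one, List.map_map]
    simp]
  rw [PySem.List.pyRange_one_append 0 n N hn0 hnN, List.map_append]
  congr 1
  · -- top rows
    apply List.map_congr_left
    intro i hi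
    rw [PySem.List.mem_pyRange_one] at hi
    rw [sliceMap _ m (2 * m) hm0 (by omega) (by have := hrowlen i hi.1 (by omega); omega),
      sliceMap _ m M hm0 hmM (hrowlen (i + n) (by omega) (by omega)),
      range_split m M hm0 hmM (fun j => quadVal n m arr i j)]
    congr 1
    · rw [show (2 * m - m).toNat = m.toNat by omega]
      apply List.map_congr_left
      intro j hj
      rw [List.mem_range] at hj
      have hjm : (j : Int) < m := by omega
      unfold quadVal
      rw [if_pos ⟨hi.1, hi.2, by positivity, hjm⟩, add_comm]
    · apply List.map_congr_left
      intro k hk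
      rw [List.mem_range] at hk
      unfold quadVal
      rw [if_neg (by omega), if_pos ⟨hi.1, hi.2, by omega⟩]
  · -- bottom rows
    apply List.map_congr_left
    intro i hi
    rw [PySem.List.mem_pyRange_one] at hi
    rw [sliceMap _ 0 m (le_refl 0) hm0 (by have := hrowlen (i - n) (by omega) (by omega); omega),
      sliceMap _ 0 (M - m) (le_refl 0) (by omega) (by have := hrowlen i (by omega) hi.2; omega),
      range_split m M hm0 hmM (fun j => quadVal n m arr i j)]
    congr 1
    · rw [show (m - 0).toNat = m.toNat by omega]
      apply List.map_congr_left
      intro j hj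
      rw [List.mem_range] at hj
      have hjm : (j : Int) < m := by omega
      unfold quadVal
      rw [if_neg (by omega), if_neg (by omega), if_neg (by omega),
        if_pos ⟨hi.1, by positivity, hjm⟩, zero_add]
    · rw [show (M - m - 0).toNat = (M - m).toNat by omega]
      apply List.map_congr_left
      intro k hk
      rw [List.mem_range] at hk
      unfold quadVal
      rw [if_neg (by omega), if_neg (by omega), if_pos ⟨hi.1, by omega⟩]
      congr 1
      omega

-- ===== VERDICT (by name: the statement is the Claim_ definition above) =====
theorem fun6_spec : Claim_equal_fun6 := by
  intro N M arr _ hpre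
  obtain ⟨hM, hlen, hrow⟩ := hpre
  unfold Spec_fun6
  by_cases hN : 0 < N
  · have hM0 : 0 ≤ M := by omega
    rw [funA_eq N M arr hN hM0, funB_eq N M arr hN hM0 hlen hrow]
  · -- N ≤ 0 : both sides are []
    replace hN : N ≤ 0 := by omega
    obtain ⟨h1, h2⟩ := tdiv2_between N hN
    show fun6 N M arr = fun6_alt N M arr
    unfold fun6 fun6_alt
    simp only [PySem.List.pyRange_one_eq_nil hN, PySem.List.pyRange_one_eq_nil h2,
      PySem.List.pyRange_one_eq_nil h1, List.map_nil, List.foldl_nil, List.append_nil]
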